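-- pv_equiv track=rewrite | github.com/procesor2017/Arrays-tool-v2 | src/modules/create_matrix.py | get_matrix_type
-- ===== SOURCE A (Python) =====
-- def get_matrix_type(user_input: list):
--     """I need get dict with data where 2^4 4^1 are {2: 4, 4: 1}
--
--     Args:
--         user_input (list): _description_
--     """
--     number_of_row = len(user_input)
--     number_of_col = len(user_input[0])
--
--     value_list = []
--
--     for i in range(0, number_of_col):
--         number_of_value = 0
--         for j in range(0, number_of_row):
--             try:
--                 if user_input[j][str(i)] is not None:
--                     number_of_value += 1
--             except KeyError as e:
--                 pass
--         value_list.append(number_of_value)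
--
--     n_number = {}
--
--     for i in value_list:
--         n_number[i] = value_list.count(i)
--
--     return n_number
-- ===== SOURCE B (Python) =====
-- def _tally(counts):
--     """Frequency dict by recursive partitioning: take the first value, count it as
--     the length drop after filtering it out, recurse on the remainder."""
--     if not counts:
--         return {}
--     c = counts[0]
--     rest = [x for x in counts if x != c]
--     freq = {c: len(counts) - len(rest)}
--     freq.update(_tally(rest))
--     return freq
--
--
-- def get_matrix_type(user_input: list):
--     number_of_col = len(user_input[0])
--     counts = [sum(1 for row in user_input if row.get(str(i)) is not None)
--               for i in range(number_of_col)]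
--     return _tally(counts)
-- ===== Notes on version B (the rewrite author's own statement) =====
-- stated objective: alternative
-- what changed: Phase 1 computes the per-column counts with a comprehension summing row.get lookups instead of index loops with try/except; phase 2 replaces A's scan-and-insert loop (n_number[i] = value_list.count(i) for every element) by a recursive partition: take the first count value, filter out all its occurrences, record its multiplicity as the length drop, and recurse on the remainder, merging the sub-result with dict.update.
import Mathlib
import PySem

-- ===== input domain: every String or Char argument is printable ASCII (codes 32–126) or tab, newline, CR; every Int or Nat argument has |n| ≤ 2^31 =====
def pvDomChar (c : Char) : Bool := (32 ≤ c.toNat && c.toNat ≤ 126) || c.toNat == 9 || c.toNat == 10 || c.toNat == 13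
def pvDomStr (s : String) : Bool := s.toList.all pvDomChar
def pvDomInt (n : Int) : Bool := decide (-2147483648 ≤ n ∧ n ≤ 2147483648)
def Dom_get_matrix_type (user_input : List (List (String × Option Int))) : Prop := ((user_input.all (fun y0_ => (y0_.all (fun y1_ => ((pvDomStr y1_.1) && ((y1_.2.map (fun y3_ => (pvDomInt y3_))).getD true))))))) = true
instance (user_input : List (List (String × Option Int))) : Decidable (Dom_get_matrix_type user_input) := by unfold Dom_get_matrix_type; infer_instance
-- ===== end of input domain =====

-- B keeps a per-column count comprehension, then builds the frequency dict by recursive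
-- partitioning (filter out the first value, count it as the length drop) instead of A's
-- repeated value_list.count scans; equal cost, different algorithm ("alternative").


-- ===== PORT A =====
-- A-side helper: the body of A's inner loop — 'try: if user_input[j][str(i)] is not None:
-- number_of_value += 1  except KeyError: pass' (KeyError is the 'none' branch of dict lookup).
def pvTryStep (row : List (String × Option Int)) (i : Int) (acc : Int) : Int :=
  match (PySem.Dict.ofList row).get? (PySem.Int.toStr i) with
  | some v => if v.isSome then acc + 1 else acc
  | none => acc

-- A: column-major nested loops building value_list, then 'for i in value_list:
-- n_number[i] = value_list.count(i)'.
def get_matrix_type (user_input : List (List (String × Option Int))) : List (Int × Int) :=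
  let number_of_row : Int := PySem.List.len user_input
  let number_of_col : Int := ((PySem.Dict.ofList (PySem.List.pyGetD user_input 0 [])).size : Int)
  let value_list : List Int :=
    (PySem.List.pyRange 0 number_of_col 1).foldl (fun vl i =>
      vl ++ [ (PySem.List.pyRange 0 number_of_row 1).foldl (fun acc j =>
                pvTryStep (PySem.List.pyGetD user_input j []) i acc) (0 : Int) ]) []
  let n_number : PySem.Dict Int Int :=
    value_list.foldl (fun d i => d.insert i ((PySem.List.count value_list i : Int))) PySem.Dict.empty
  n_number.items

-- ===== PORT B =====
-- B-side helper _tally: if empty return {}; c = counts[0]; rest = [x for x in counts if x != c];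
-- freq = {c: len(counts) - len(rest)}; freq.update(_tally(rest)); return freq.
def pvTally : List Int → PySem.Dict Int Int
  | [] => PySem.Dict.empty
  | c :: t =>
    let rest := (c :: t).filter (fun x => x ≠ c)
    let freq : PySem.Dict Int Int := PySem.Dict.empty.insert c (((c :: t).length : Int) - (rest.length : Int))
    freq.update (pvTally rest).items
termination_by l => l.length
decreasing_by
  have hle : ((c :: t).filter (fun x => x ≠ c)).length ≤ t.length := by
    rw [List.filter_cons]
    simp only [decide_eq_true_eq, ne_eq, not_true_eq_false, if_false]
    exact List.length_filter_le _ _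
  simpa using Nat.lt_succ_of_le hle

-- B: counts = [sum(1 for row in user_input if row.get(str(i)) is not None) for i in range(cols)],
-- then return _tally(counts).
def get_matrix_type_alt (user_input : List (List (String × Option Int))) : List (Int × Int) :=
  let number_of_col : Int := ((PySem.Dict.ofList (PySem.List.pyGetD user_input 0 [])).size : Int)
  let counts : List Int :=
    (PySem.List.pyRange 0 number_of_col 1).map (fun i =>
      user_input.foldl (fun acc row =>
        if ((PySem.Dict.ofList row).getD (PySem.Int.toStr i) none).isSome then acc + 1 else acc) (0 : Int))
  (pvTally counts).items

-- ===== PRECONDITION & SPEC =====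
-- Pre_ excludes only the empty outer list, on which Python A raises IndexError at user_input[0] (B too).
def Pre_get_matrix_type (user_input : List (List (String × Option Int))) : Prop := user_input ≠ []
instance (user_input : List (List (String × Option Int))) : Decidable (Pre_get_matrix_type user_input) := by unfold Pre_get_matrix_type; infer_instance
def pvWitness_get_matrix_type : (List (List (String × Option Int))) := [[("0", some 2), ("1", none)], [("0", some 3)]]
def Spec_get_matrix_type (user_input : List (List (String × Option Int))) (out : List (Int × Int)) : Prop := out = get_matrix_type_alt user_input
instance (user_input : List (List (String × Option Int))) (out : List (Int × Int)) : Decidable (Spec_get_matrix_type user_input out) := by unfold Spec_get_matrix_type; infer_instance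

-- ===== CLAIM (what is proved, stated in full; the proofs are below) =====
def Claim_equal_get_matrix_type : Prop := ∀ (user_input : List (List (String × Option Int))), Dom_get_matrix_type user_input → Pre_get_matrix_type user_input → Spec_get_matrix_type user_input (get_matrix_type user_input)

-- ===== LEMMAS AND PROOFS =====

-- A's try/except body is an if on 'lookup succeeded with a non-None value'
lemma pvTryStep_eq (row : List (String × Option Int)) (i acc : Int) :
    pvTryStep row i acc
      = if ((PySem.Dict.ofList row).getD (PySem.Int.toStr i) none).isSome then acc + 1 else acc := by
  cases hget : (PySem.Dict.ofList row).get? (PySem.Int.toStr i) with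
  | none => simp [pvTryStep, PySem.Dict.getD_eq_get?_getD, hget]
  | some v => simp [pvTryStep, PySem.Dict.getD_eq_get?_getD, hget]

-- A's inner loop over row indices is B's fold over the rows themselves
lemma pvA_inner (ui : List (List (String × Option Int))) (i : Int) :
    (PySem.List.pyRange 0 (PySem.List.len ui) 1).foldl (fun acc j =>
      pvTryStep (PySem.List.pyGetD ui j []) i acc) (0 : Int)
    = ui.foldl (fun acc row =>
        if ((PySem.Dict.ofList row).getD (PySem.Int.toStr i) none).isSome then acc + 1 else acc) (0 : Int) := by
  rw [PySem.List.foldl_pyRange_zero_pyGetD ui [] (fun acc row => pvTryStep row i acc) 0]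
  have h : (fun (acc : Int) (row : List (String × Option Int)) => pvTryStep row i acc)
      = fun acc row =>
          if ((PySem.Dict.ofList row).getD (PySem.Int.toStr i) none).isSome then acc + 1 else acc := by
    funext acc row; exact pvTryStep_eq row i acc
  rw [h]

-- adding an element already present in the set is a no-op, so is every later add of it
lemma pv_foldl_add_filter (t : List Int) : ∀ (s : List Int) (c : Int), c ∈ s →
    t.foldl PySem.Set.add s = (t.filter (fun x => x ≠ c)).foldl PySem.Set.add s := by
  induction t with
  | nil => intro s c _; rfl
  | cons y t ih =>
    intro s c hc
    by_cases hyc : y = c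
    · subst hyc
      have : PySem.Set.add s y = s := by
        simp [PySem.Set.add, PySem.Set.contains, hc]
      simp [this, ih s y hc]
    · have hmem : c ∈ PySem.Set.add s y := by
        simp [PySem.Set.add]; split <;> simp [hc]
      simp [hyc, ih _ c hmem]

-- an element absent from the rest of the fold stays at the front of the accumulator
lemma pv_foldl_add_cons (t : List Int) : ∀ (s : List Int) (c : Int), c ∉ t →
    t.foldl PySem.Set.add (c :: s) = c :: t.foldl PySem.Set.add s := by
  induction t with
  | nil => intro s c _; rfl
  | cons y t ih =>
    intro s c hc
    have hyc : y ≠ c := fun h => hc (by simp [h])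
    have : PySem.Set.add (c :: s) y = c :: PySem.Set.add s y := by
      simp [PySem.Set.add, PySem.Set.contains, hyc]
      split <;> simp
    rw [List.foldl_cons, List.foldl_cons, this, ih _ c (fun h => hc (by simp [h]))]

-- set(c :: t) = c followed by set of t with c filtered out
lemma pv_ofList_cons (c : Int) (t : List Int) :
    PySem.Set.ofList (c :: t) = c :: PySem.Set.ofList (t.filter (fun x => x ≠ c)) := by
  have h1 : PySem.Set.ofList (c :: t) = t.foldl PySem.Set.add [c] := rfl
  rw [h1, pv_foldl_add_filter t [c] c (by simp)]
  have h2 : c ∉ t.filter (fun x => x ≠ c) := by simp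
  rw [show ([c] : List Int) = c :: [] from rfl, pv_foldl_add_cons _ [] c h2]
  rfl

-- splitting a list into the occurrences of c and the rest preserves total length
lemma pv_count_aux (c : Int) (l : List Int) :
    l.count c + (l.filter (fun x => x ≠ c)).length = l.length := by
  induction l with
  | nil => simp
  | cons y t ih =>
    by_cases h : y = c
    · rw [h, List.count_cons_self, List.filter_cons_of_neg (by simp), List.length_cons]
      omega
    · rw [List.count_cons_of_ne h, List.filter_cons_of_pos (by simp [h])]
      simp only [List.length_cons]
      omega

-- the filtered-out run has exactly count-many elements
lemma pv_count_head (c : Int) (l : List Int) :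
    (l.count c : Int) = (l.length : Int) - ((l.filter (fun x => x ≠ c)).length : Int) := by
  have h := pv_count_aux c l
  omega

-- one unfolding step of the recursive partition tally, assuming the recursive call is solved
lemma pvTally_cons_items (c : Int) (t : List Int)
    (ihr : (pvTally ((c :: t).filter (fun x => x ≠ c))).items
      = (PySem.Set.ofList ((c :: t).filter (fun x => x ≠ c))).map
          (fun k => (k, ((((c :: t).filter (fun x => x ≠ c)).count k : Nat) : Int)))) :
    (pvTally (c :: t)).items
      = (PySem.Set.ofList (c :: t)).map (fun k => (k, (((c :: t).count k : Nat) : Int))) := by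
  have hfresh : ∀ p ∈ (pvTally ((c :: t).filter (fun x => x ≠ c))).items,
      (PySem.Dict.empty.insert c (((c :: t).length : Int)
        - (((c :: t).filter (fun x => x ≠ c)).length : Int))).contains p.1 = false := by
    intro p hp
    have hk : p.1 ∈ PySem.Set.ofList ((c :: t).filter (fun x => x ≠ c)) := by
      have := List.mem_map_of_mem (f := Prod.fst) hp
      rw [ihr] at this
      simpa using this
    have hmem : p.1 ∈ (c :: t).filter (fun x => x ≠ c) := (PySem.Set.mem_ofList _ _).mp hk
    have hne : p.1 ≠ c := by
      have := List.of_mem_filter hmem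
      simpa using this
    simp [PySem.Dict.contains_insert, PySem.Dict.contains_empty, hne]
  have hnd : ((pvTally ((c :: t).filter (fun x => x ≠ c))).items.map Prod.fst).Nodup := by
    rw [ihr, List.map_map]
    have hcomp : (Prod.fst ∘ fun k : Int =>
        ((k, ((((c :: t).filter (fun x => x ≠ c)).count k : Nat) : Int)) : Int × Int)) = id := by
      funext k; rfl
    rw [hcomp, List.map_id]
    exact PySem.Set.nodup_ofList _
  have hupd :
      ((PySem.Dict.empty.insert c (((c :: t).length : Int)
          - (((c :: t).filter (fun x => x ≠ c)).length : Int))).update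
        (pvTally ((c :: t).filter (fun x => x ≠ c))).items).items
      = (PySem.Dict.empty.insert c (((c :: t).length : Int)
          - (((c :: t).filter (fun x => x ≠ c)).length : Int))).items
        ++ (pvTally ((c :: t).filter (fun x => x ≠ c))).items := by
    have := PySem.Dict.items_foldl_insert_fresh
      (d := PySem.Dict.empty.insert c (((c :: t).length : Int)
          - (((c :: t).filter (fun x => x ≠ c)).length : Int)))
      (l := (pvTally ((c :: t).filter (fun x => x ≠ c))).items)
      (k := Prod.fst) (v := Prod.snd) hfresh hnd
    simpa [PySem.Dict.update] using this
  have hstep : (pvTally (c :: t)).items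
      = (PySem.Dict.empty.insert c (((c :: t).length : Int)
          - (((c :: t).filter (fun x => x ≠ c)).length : Int))).items
        ++ (pvTally ((c :: t).filter (fun x => x ≠ c))).items := by
    rw [pvTally]
    exact hupd
  rw [hstep, ihr, pv_ofList_cons]
  have hrt : (c :: t).filter (fun x => x ≠ c) = t.filter (fun x => x ≠ c) :=
    List.filter_cons_of_neg (by simp)
  have hcnt : (((c :: t).count c : Nat) : Int)
      = ((c :: t).length : Int) - (((c :: t).filter (fun x => x ≠ c)).length : Int) :=
    pv_count_head c (c :: t)
  have hhead : (PySem.Dict.empty.insert c (((c :: t).length : Int)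
      - (((c :: t).filter (fun x => x ≠ c)).length : Int))).items
      = [(c, ((c :: t).length : Int) - (((c :: t).filter (fun x => x ≠ c)).length : Int))] := rfl
  rw [hrt] at hcnt
  rw [hhead, hrt, List.map_cons, ← hcnt, List.singleton_append]
  congr 1
  apply List.map_congr_left
  intro k hkmem
  have hk2 : k ∈ t.filter (fun x => x ≠ c) := (PySem.Set.mem_ofList _ _).mp hkmem
  have hne : k ≠ c := by
    have := List.of_mem_filter hk2
    simpa using this
  have h1 : (t.filter (fun x => x ≠ c)).count k = t.count k :=
    List.count_filter (by simp [hne])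
  have h2 : (c :: t).count k = t.count k := List.count_cons_of_ne (fun hh => hne hh.symm)
  rw [h1, h2]

-- the recursive partition tally produces Counter(l)'s items (strong induction on length)
lemma pvTally_items_aux : ∀ (n : Nat) (l : List Int), l.length ≤ n →
    (pvTally l).items = (PySem.Set.ofList l).map (fun k => (k, (l.count k : Int))) := by
  intro n
  induction n with
  | zero =>
    intro l h
    have : l = [] := List.eq_nil_of_length_eq_zero (Nat.le_zero.mp h)
    subst this
    rw [pvTally]
    rfl
  | succ n ih =>
    intro l h
    match l with
    | [] => rw [pvTally]; rfl
    | c :: t =>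
      refine pvTally_cons_items c t (ih _ ?_)
      have hle : ((c :: t).filter (fun x => x ≠ c)).length ≤ t.length := by
        rw [List.filter_cons_of_neg (by simp)]
        exact List.length_filter_le _ _
      simpa using Nat.le_trans hle (by simpa using Nat.le_of_succ_le_succ h)

lemma pvTally_items (l : List Int) :
    (pvTally l).items = (PySem.Set.ofList l).map (fun k => (k, (l.count k : Int))) :=
  pvTally_items_aux l.length l (le_refl _)

-- A's frequency loop: inserted values depend only on the key
lemma pv_foldl_insert_const_getD (c : Int → Int) (l : List Int) (d : PySem.Dict Int Int) (k : Int) (d0 : Int) :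
    ((l.foldl (fun d i => d.insert i (c i)) d).getD k d0) = if k ∈ l then c k else d.getD k d0 := by
  induction l using List.reverseRecOn generalizing d with
  | nil => simp
  | append_singleton l x ih =>
    rw [List.foldl_append, List.foldl_cons, List.foldl_nil, PySem.Dict.getD_insert, ih]
    by_cases hx : k = x <;> by_cases hl : k ∈ l <;> simp [hx, hl]

-- A's 'n_number[i] = value_list.count(i)' loop builds exactly Counter(value_list)
lemma pv_freqA_eq_counter (l : List Int) :
    l.foldl (fun d i => d.insert i ((PySem.List.count l i : Int))) PySem.Dict.empty = PySem.Dict.counter l := by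
  apply PySem.Dict.ext
  have hk : (l.foldl (fun d i => d.insert i ((PySem.List.count l i : Int))) PySem.Dict.empty).keys = PySem.Set.ofList l := by
    rw [PySem.Dict.keys_foldl_insert (f := fun _ i => ((PySem.List.count l i : Int)))]
    simp [PySem.Set.update_nil_left]
  have hnd : (l.foldl (fun d i => d.insert i ((PySem.List.count l i : Int))) PySem.Dict.empty).keys.Nodup := by
    rw [hk]; exact PySem.Set.nodup_ofList l
  rw [PySem.Dict.items_eq_map_keys _ hnd 0, hk, PySem.Dict.items_counter]
  apply List.map_congr_left
  intro k hkmem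
  have hmem : k ∈ l := (PySem.Set.mem_ofList _ _).mp hkmem
  rw [pv_foldl_insert_const_getD, if_pos hmem, PySem.List.count_eq]

-- ===== VERDICT (by name: the statement is the Claim_ definition above) =====
theorem get_matrix_type_spec : Claim_equal_get_matrix_type := by
  intro ui _ _
  show get_matrix_type ui = get_matrix_type_alt ui
  simp only [get_matrix_type, get_matrix_type_alt]
  rw [pv_freqA_eq_counter, PySem.Dict.items_counter]
  rw [PySem.List.foldl_append_singleton_eq_map]
  simp only [List.nil_append, pvA_inner]
  rw [← pvTally_items]
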